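-- pv_equiv track=rewrite | github.com/MikeyQiu/SAT_DPLL_Sudoku | DPLL_origin.py | tautologyRule
-- ===== SOURCE A (Python) =====
-- def tautologyRule(cnf):
--     # tautology check
--     for clause in cnf:
--         if len(clause) > 1:
--             clause.sort()
--             i, j, = 0, len(clause) - 1
--             while (i <= j):
--                 if clause[i] == -clause[j]:
--                     del clause[:]  # delete the clause out of the cnf
--                     break
--                 elif clause[i] < -clause[j]:
--                     i += 1
--                 else:
--                     j -= 1
--     return (cnf)
-- ===== SOURCE B (Python) =====
-- def tautologyRule(cnf):
--     # set-based tautology test instead of the two-pointer scan; same in-place sort/clear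
--     for clause in cnf:
--         if len(clause) > 1:
--             clause.sort()
--             seen = set(clause)
--             if any(-x in seen for x in clause):
--                 del clause[:]
--     return cnf
-- ===== Notes on version B (the rewrite author's own statement) =====
-- stated objective: simpler
-- what changed: replaces the sorted two-pointer meet-in-the-middle scan with a single pass over a hash set of the clause's literals (any(-x in seen)), keeping the in-place sort and clear
import Mathlib
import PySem

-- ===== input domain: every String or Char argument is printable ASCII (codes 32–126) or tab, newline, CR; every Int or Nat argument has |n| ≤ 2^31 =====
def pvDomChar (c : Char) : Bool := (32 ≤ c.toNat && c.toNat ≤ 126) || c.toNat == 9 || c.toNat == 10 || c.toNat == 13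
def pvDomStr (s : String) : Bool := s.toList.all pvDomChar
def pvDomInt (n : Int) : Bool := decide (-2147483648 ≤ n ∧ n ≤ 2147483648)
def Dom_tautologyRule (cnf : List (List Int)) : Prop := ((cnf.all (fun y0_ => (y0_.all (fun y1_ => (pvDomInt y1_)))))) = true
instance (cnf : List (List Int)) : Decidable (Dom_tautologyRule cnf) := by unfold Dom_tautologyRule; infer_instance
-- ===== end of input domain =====

-- B replaces A's two-pointer tautology scan with a single set-membership pass; the in-place
-- sort and clear of each clause are side effects of A (and B); the equivalence proved is about
-- the RETURN value (which contains the mutated clauses).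

-- ===== PORT A =====
-- the while-loop of A: i, j move inward over the sorted clause; indices stay in [0, len-1]
-- whenever 0 ≤ i ≤ j < len, so getD with default 0 is exact there
def pvTwoPtr (c : List Int) (i j : Int) : Bool :=
  if i ≤ j then
    let a := c.getD i.toNat 0
    let b := c.getD j.toNat 0
    if a = -b then true
    else if a < -b then pvTwoPtr c (i + 1) j
    else pvTwoPtr c i (j - 1)
  else false
termination_by (j + 1 - i).toNat
decreasing_by all_goals omega

def tautologyRule (cnf : List (List Int)) : List (List Int) :=
  cnf.map (fun clause =>
    if 1 < clause.length then
      let s := PySem.List.sorted clause (fun x => x) false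
      if pvTwoPtr s 0 ((s.length : Int) - 1) then [] else s
    else clause)

-- ===== PORT B =====
def tautologyRule_alt (cnf : List (List Int)) : List (List Int) :=
  cnf.map (fun clause =>
    if 1 < clause.length then
      let s := PySem.List.sorted clause (fun x => x) false
      let seen := PySem.Set.ofList s
      if s.any (fun x => PySem.Set.contains seen (-x)) then [] else s
    else clause)

-- ===== PRECONDITION & SPEC =====
def Spec_tautologyRule (cnf : List (List Int)) (out : List (List Int)) : Prop := out = tautologyRule_alt cnf
instance (cnf : List (List Int)) (out : List (List Int)) : Decidable (Spec_tautologyRule cnf out) := by unfold Spec_tautologyRule; infer_instance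

-- ===== CLAIM (what is proved, stated in full; the proofs are below) =====
def Claim_equal_tautologyRule : Prop := ∀ (cnf : List (List Int)), Dom_tautologyRule cnf → Spec_tautologyRule cnf (tautologyRule cnf)

-- ===== LEMMAS AND PROOFS =====

-- the two-pointer walk on a ≤-sorted list finds exactly whether some x and -x both occur in [i..j]
theorem pvTwoPtr_iff (t : List Int)
    (hs : ∀ p q : Nat, p ≤ q → q < t.length → t.getD p 0 ≤ t.getD q 0)
    (i j : Int) (hi : 0 ≤ i) (hj : j < (t.length : Int)) :
    pvTwoPtr t i j = true ↔
      ∃ p q : Nat, i ≤ (p : Int) ∧ p ≤ q ∧ (q : Int) ≤ j ∧ t.getD p 0 = -(t.getD q 0) := by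
  generalize hn : (j + 1 - i).toNat = n
  induction n using Nat.strong_induction_on generalizing i j with
  | _ n ih =>
    rw [pvTwoPtr]
    by_cases hij : i ≤ j
    · simp only [hij, if_true]
      have hjn : (j.toNat : Int) = j := by omega
      have hin : (i.toNat : Int) = i := by omega
      set a := t.getD i.toNat 0 with ha
      set b := t.getD j.toNat 0 with hb
      by_cases hab : a = -b
      · rw [if_pos hab]
        simp only [true_iff]
        exact ⟨i.toNat, j.toNat, by omega, by omega, by omega, by rw [← ha, ← hb, hab]⟩
      · simp only [if_neg hab]
        by_cases hlt : a < -b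
        · simp only [if_pos hlt]
          rw [ih (j + 1 - (i + 1)).toNat (by omega) (i + 1) j (by omega) hj rfl]
          constructor
          · rintro ⟨p, q, h1, h2, h3, h4⟩; exact ⟨p, q, by omega, h2, h3, h4⟩
          · rintro ⟨p, q, h1, h2, h3, h4⟩
            refine ⟨p, q, ?_, h2, h3, h4⟩
            rcases lt_or_ge i (p : Int) with h | h
            · omega
            · exfalso
              have hpi : p = i.toNat := by omega
              have hqlen : q < t.length := by omega
              have : t.getD q 0 ≤ b := hb ▸ hs q j.toNat (by omega) (by omega)
              have : -b ≤ -(t.getD q 0) := by omega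
              rw [hpi, ← ha] at h4
              omega
        · simp only [if_neg hlt]
          rw [ih (j - 1 + 1 - i).toNat (by omega) i (j - 1) hi (by omega) (by omega)]
          constructor
          · rintro ⟨p, q, h1, h2, h3, h4⟩; exact ⟨p, q, h1, h2, by omega, h4⟩
          · rintro ⟨p, q, h1, h2, h3, h4⟩
            refine ⟨p, q, h1, h2, ?_, h4⟩
            rcases lt_or_ge (q : Int) j with h | h
            · omega
            · exfalso
              have hqj : q = j.toNat := by omega
              have : a ≤ t.getD p 0 := ha ▸ hs i.toNat p (by omega) (by omega)
              rw [hqj, ← hb] at h4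
              omega
    · simp only [hij, if_false, Bool.false_eq_true, false_iff]
      rintro ⟨p, q, h1, h2, h3, _⟩
      omega

theorem sorted_getD_mono (xs : List Int) (p q : Nat) (hpq : p ≤ q)
    (hq : q < (PySem.List.sorted xs (fun x => x) false).length) :
    (PySem.List.sorted xs (fun x => x) false).getD p 0 ≤
      (PySem.List.sorted xs (fun x => x) false).getD q 0 := by
  have hp : p < (PySem.List.sorted xs (fun x => x) false).length := lt_of_le_of_lt hpq hq
  rw [List.getD_eq_getElem _ _ hp, List.getD_eq_getElem _ _ hq]
  exact PySem.List.sorted_id_getElem_mono xs hpq hq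

-- on each clause A's two-pointer verdict equals B's set-membership test
theorem clause_eq (clause : List Int) :
    pvTwoPtr (PySem.List.sorted clause (fun x => x) false) 0
        (((PySem.List.sorted clause (fun x => x) false).length : Int) - 1) =
      (PySem.List.sorted clause (fun x => x) false).any
        (fun x => PySem.Set.contains (PySem.Set.ofList (PySem.List.sorted clause (fun x => x) false)) (-x)) := by
  set t := PySem.List.sorted clause (fun x => x) false with ht
  rcases Nat.eq_zero_or_pos t.length with h0 | hpos
  · rw [List.length_eq_zero_iff.mp h0]
    rw [pvTwoPtr]
    norm_num
  · rw [Bool.eq_iff_iff]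
    rw [pvTwoPtr_iff t (sorted_getD_mono clause) 0 ((t.length : Int) - 1) (by omega) (by omega)]
    rw [List.any_eq_true]
    constructor
    · rintro ⟨p, q, _, hpq, hql, h4⟩
      have hq : q < t.length := by omega
      have hp : p < t.length := by omega
      refine ⟨t[p], List.getElem_mem hp, ?_⟩
      rw [PySem.Set.contains_iff, PySem.Set.mem_ofList]
      have hgp : t.getD p 0 = t[p] := List.getD_eq_getElem _ _ hp
      have hgq : t.getD q 0 = t[q] := List.getD_eq_getElem _ _ hq
      have he : -t[p] = t[q] := by omega
      rw [he]
      exact List.getElem_mem hq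
    · rintro ⟨x, hx, hc⟩
      rw [PySem.Set.contains_iff, PySem.Set.mem_ofList] at hc
      obtain ⟨p, hp, hxp⟩ := List.mem_iff_getElem.mp hx
      obtain ⟨q, hq, hxq⟩ := List.mem_iff_getElem.mp hc
      rcases le_total p q with h | h
      · exact ⟨p, q, by omega, h, by omega,
          by rw [List.getD_eq_getElem _ _ hp, List.getD_eq_getElem _ _ hq, hxp, hxq]; omega⟩
      · exact ⟨q, p, by omega, h, by omega,
          by rw [List.getD_eq_getElem _ _ hq, List.getD_eq_getElem _ _ hp, hxp, hxq]⟩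

-- ===== VERDICT (by name: the statement is the Claim_ definition above) =====
theorem tautologyRule_spec : Claim_equal_tautologyRule := by
  intro cnf _
  unfold Spec_tautologyRule tautologyRule tautologyRule_alt
  apply List.map_congr_left
  intro clause _
  by_cases h : 1 < clause.length
  · simp only [if_pos h, clause_eq clause]
  · simp only [if_neg h]
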